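-- pv_equiv track=rewrite | github.com/yinxingmaimingg/count_distinct_palindrome | cdp.py | computeLmp
-- ===== SOURCE A (Python) =====
-- def getWordsLcp(u, v):
-- 	l = min(len(u), len(v))
-- 	for i in range(l):
-- 		if (u[i]!=v[i]):
-- 			return i
-- 	return l
--
-- def computeLcp(w):
-- 	lcp = []
-- 	w_ = w[::-1]
-- 	for i in range(len(w)):
-- 		lcp.append([])
-- 		for j in range(len(w)):
-- 			lcp[i].append(getWordsLcp(w[i:], w_[j:]))
-- 	return lcp
--
-- def computeLmp(w):
-- 	n = len(w)
-- 	lcp = computeLcp(w)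
-- 	lmp = []
-- 	for i in range(n):
-- 		lmp.append(-1)
-- 	for k in range(n):
-- 		i = k + lcp[k][n-k-1] - 1
-- 		lmp[i] = max(lmp[i], 2*lcp[k][n-k-1] -1)
-- 	for k in range(1, n):
-- 		i = k + lcp[k][n-k] - 1
-- 		lmp[i] = max(lmp[i], 2*lcp[k][n-k])
-- 	for i in range(n):
-- 		if (lmp[i]==0):
-- 			lmp[i] = -1
-- 	return lmp
-- ===== SOURCE B (Python) =====
-- def computeLmp(w):
--     # Expand around each palindrome center instead of building the O(n^2) LCP
--     # table of suffixes vs. reversed-string suffixes.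
--     n = len(w)
--     lmp = [-1] * n
--     for c in range(n):
--         r = 1
--         while r <= c and c + r < n and w[c - r] == w[c + r]:
--             r += 1
--         i = c + r - 1
--         v = 2 * r - 1
--         if v > lmp[i]:
--             lmp[i] = v
--     for c in range(1, n):
--         r = 0
--         while r + 1 <= c and c + r < n and w[c - 1 - r] == w[c + r]:
--             r += 1
--         if r > 0:
--             i = c + r - 1
--             v = 2 * r
--             if v > lmp[i]:
--                 lmp[i] = v
--     return lmp
-- ===== Notes on version B (the rewrite author's own statement) =====
-- stated objective: faster
-- what changed: Replaces the full n-by-n LCP table of suffixes vs reversed-string suffixes with direct expand-around-center scans (one per odd/even center), skipping the write when the even extension is 0 so the final 0-to-minus-1 pass disappears.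
import Mathlib
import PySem

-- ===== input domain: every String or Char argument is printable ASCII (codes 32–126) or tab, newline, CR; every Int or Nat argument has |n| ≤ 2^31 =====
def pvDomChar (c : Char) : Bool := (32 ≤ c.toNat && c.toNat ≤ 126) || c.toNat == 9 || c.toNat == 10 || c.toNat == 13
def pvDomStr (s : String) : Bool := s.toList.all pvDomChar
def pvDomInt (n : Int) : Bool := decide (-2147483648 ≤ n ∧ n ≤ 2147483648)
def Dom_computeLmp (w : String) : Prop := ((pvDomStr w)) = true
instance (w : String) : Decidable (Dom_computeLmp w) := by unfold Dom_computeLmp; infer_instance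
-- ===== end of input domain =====

-- B replaces A's full LCP table (suffixes vs reversed-string suffixes) by expand-around-center scans.

-- ===== PORT A =====
-- 'for i in range(l): if u[i]!=v[i]: return i / return l' as recursion on i
-- (indices are always in range 0 ≤ i < l ≤ min of the lengths, so getD is exact).
def gwLoop (u v : List Char) (l i : Nat) : Int :=
  if _h : i < l then
    if u.getD i ' ' ≠ v.getD i ' ' then (i : Int) else gwLoop u v l (i + 1)
  else (l : Int)
  termination_by l - i

def getWordsLcp (u v : List Char) : Int :=
  gwLoop u v (min u.length v.length) 0

-- w[i:] with 0 ≤ i is exactly List.drop i; w[::-1] is reverse.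
def computeLcp (w : List Char) : List (List Int) :=
  (List.range w.length).map fun i =>
    (List.range w.length).map fun j => getWordsLcp (w.drop i) (w.reverse.drop j)

-- 'lmp[i] = max(lmp[i], v)'; the index i is always in range 0 ≤ i < len here, so getD/toNat are exact.
def setMaxA (xs : List Int) (i : Int) (v : Int) : List Int :=
  xs.set i.toNat (max (xs.getD i.toNat 0) v)

def computeLmp (w : String) : List Int :=
  let l := w.toList
  let n := l.length
  let lcp := computeLcp l
  let lmp0 : List Int := List.replicate n (-1)
  let lmp1 := (List.range n).foldl (fun lmp k =>
      let L := (lcp.getD k []).getD (n - k - 1) 0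
      setMaxA lmp ((k : Int) + L - 1) (2 * L - 1)) lmp0
  let lmp2 := (List.range' 1 (n - 1)).foldl (fun lmp k =>
      let L := (lcp.getD k []).getD (n - k) 0
      setMaxA lmp ((k : Int) + L - 1) (2 * L)) lmp1
  lmp2.map fun x => if x = 0 then -1 else x

-- ===== PORT B =====
-- 'while r <= c and c + r < n and w[c-r] == w[c+r]: r += 1' (indices in range, getD exact)
def expandOdd (l : List Char) (n c r : Nat) : Nat :=
  if h : r ≤ c ∧ c + r < n then
    if l.getD (c - r) ' ' = l.getD (c + r) ' ' then expandOdd l n c (r + 1) else r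
  else r
  termination_by n - r
  decreasing_by omega

def expandEven (l : List Char) (n c r : Nat) : Nat :=
  if h : r + 1 ≤ c ∧ c + r < n then
    if l.getD (c - 1 - r) ' ' = l.getD (c + r) ' ' then expandEven l n c (r + 1) else r
  else r
  termination_by n - r
  decreasing_by omega

-- 'if v > lmp[i]: lmp[i] = v'
def setIfGt (xs : List Int) (i : Nat) (v : Int) : List Int :=
  if v > xs.getD i 0 then xs.set i v else xs

def computeLmp_alt (w : String) : List Int :=
  let l := w.toList
  let n := l.length
  let lmp1 := (List.range n).foldl (fun lmp c =>
      let r := expandOdd l n c 1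
      setIfGt lmp (c + r - 1) (2 * (r : Int) - 1)) (List.replicate n (-1))
  (List.range' 1 (n - 1)).foldl (fun lmp c =>
      let r := expandEven l n c 0
      if r = 0 then lmp else setIfGt lmp (c + r - 1) (2 * (r : Int))) lmp1

-- ===== PRECONDITION & SPEC =====
def Spec_computeLmp (w : String) (out : List Int) : Prop := out = computeLmp_alt w
instance (w : String) (out : List Int) : Decidable (Spec_computeLmp w out) := by unfold Spec_computeLmp; infer_instance

-- ===== CLAIM (what is proved, stated in full; the proofs are below) =====
def Claim_equal_computeLmp : Prop := ∀ (w : String), Dom_computeLmp w → Spec_computeLmp w (computeLmp w)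

-- ===== LEMMAS AND PROOFS =====

-- structural version of the common-prefix length
def lcpNat : List Char → List Char → Nat
  | a :: u, b :: v => if a = b then lcpNat u v + 1 else 0
  | _, _ => 0

theorem lcpNat_nil_left (v : List Char) : lcpNat [] v = 0 := by cases v <;> rfl

theorem lcpNat_nil_right (u : List Char) : lcpNat u [] = 0 := by cases u <;> rfl

theorem lcpNat_le_left : ∀ u v : List Char, lcpNat u v ≤ u.length := by
  intro u
  induction u with
  | nil => intro v; simp [lcpNat_nil_left]
  | cons a u ih =>
    intro v
    cases v with
    | nil => simp [lcpNat_nil_right]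
    | cons b v =>
      simp only [lcpNat]
      split
      · simpa using ih v
      · simp

theorem getDC (xs : List Char) (j : Nat) (h : j < xs.length) :
    xs.getD j ' ' = xs[j] := List.getD_eq_getElem xs ' ' h

theorem getDI (xs : List Int) (j : Nat) (h : j < xs.length) :
    xs.getD j 0 = xs[j] := List.getD_eq_getElem xs 0 h

theorem getD_set' (xs : List Int) (i j : Nat) (v : Int) (hi : i < xs.length) :
    (xs.set i v).getD j 0 = if i = j then v else xs.getD j 0 := by
  by_cases hj : j < xs.length
  · rw [getDI _ _ (by simpa using hj)]
    by_cases hij : i = j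
    · subst hij; simp
    · rw [List.getElem_set_ne hij, if_neg hij, getDI _ _ hj]
  · have hne : ¬ i = j := by omega
    rw [if_neg hne, List.getD_eq_default, List.getD_eq_default] <;> simpa using hj

theorem set_getD_self (xs : List Int) (i : Nat) (hi : i < xs.length) :
    xs.set i (xs.getD i 0) = xs := by
  rw [getDI _ _ hi, List.set_getElem_self]

theorem lcpNat_drop_min (u v : List Char) (i : Nat) (hi : i = min u.length v.length) :
    lcpNat (u.drop i) (v.drop i) = 0 := by
  rcases Nat.le_total u.length v.length with hm | hm
  · have hnil : u.drop i = [] := by rw [List.drop_eq_nil_iff]; omega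
    rw [hnil, lcpNat_nil_left]
  · have hnil : v.drop i = [] := by rw [List.drop_eq_nil_iff]; omega
    rw [hnil, lcpNat_nil_right]

theorem gwLoop_eq (u v : List Char) :
    ∀ d i, min u.length v.length - i ≤ d → i ≤ min u.length v.length →
      gwLoop u v (min u.length v.length) i = (i : Int) + lcpNat (u.drop i) (v.drop i) := by
  intro d
  induction d with
  | zero =>
    intro i h0 h1
    have hi : i = min u.length v.length := by omega
    rw [gwLoop, dif_neg (by omega), lcpNat_drop_min u v i hi, hi]
    simp
  | succ d ih =>
    intro i h0 h1
    by_cases hlt : i < min u.length v.length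
    · have hu : i < u.length := by omega
      have hv : i < v.length := by omega
      have hdu : u.drop i = u[i] :: u.drop (i + 1) := List.drop_eq_getElem_cons hu
      have hdv : v.drop i = v[i] :: v.drop (i + 1) := List.drop_eq_getElem_cons hv
      rw [gwLoop, dif_pos hlt, getDC _ _ hu, getDC _ _ hv]
      by_cases heq : u[i] = v[i]
      · rw [if_neg (by simpa using heq), ih (i + 1) (by omega) (by omega), hdu, hdv]
        simp only [lcpNat, if_pos heq]
        push_cast; ring
      · rw [if_pos (by simpa using heq), hdu, hdv]
        simp only [lcpNat, if_neg heq]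
        simp
    · have hi : i = min u.length v.length := by omega
      rw [gwLoop, dif_neg (by omega), lcpNat_drop_min u v i hi, hi]
      simp

theorem getWordsLcp_eq (u v : List Char) : getWordsLcp u v = (lcpNat u v : Int) := by
  have := gwLoop_eq u v (min u.length v.length) 0 (by omega) (by omega)
  simpa [getWordsLcp] using this

theorem take_succ_getElem (l : List Char) (m : Nat) (hm : m < l.length) :
    l.take (m + 1) = l.take m ++ [l[m]] := by
  rw [List.take_add_one, List.getElem?_eq_getElem hm]
  rfl

theorem expandOdd_eq (l : List Char) (c : Nat) :
    ∀ d r, l.length - r ≤ d → r ≤ c + 1 → c + r ≤ l.length →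
      expandOdd l l.length c r = r + lcpNat (l.drop (c + r)) ((l.take (c + 1 - r)).reverse) := by
  intro d
  induction d with
  | zero =>
    intro r h0 h1 h2
    have hr : c + r = l.length := by omega
    rw [expandOdd, dif_neg (by omega)]
    have : l.drop (c + r) = [] := by rw [List.drop_eq_nil_iff]; omega
    rw [this, lcpNat_nil_left]
    omega
  | succ d ih =>
    intro r h0 h1 h2
    rw [expandOdd]
    by_cases hcond : r ≤ c ∧ c + r < l.length
    · rw [dif_pos hcond]
      obtain ⟨hrc, hcr⟩ := hcond
      have hcl : c - r < l.length := by omega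
      have hcrl : c + r < l.length := hcr
      have htk : l.take (c + 1 - r) = l.take (c - r) ++ [l[c - r]] := by
        have : c + 1 - r = (c - r) + 1 := by omega
        rw [this, take_succ_getElem l (c - r) hcl]
      have hdr : l.drop (c + r) = l[c + r] :: l.drop (c + r + 1) := List.drop_eq_getElem_cons hcrl
      rw [getDC _ _ hcl, getDC _ _ hcrl]
      by_cases heq : l[c - r] = l[c + r]
      · rw [if_pos heq, ih (r + 1) (by omega) (by omega) (by omega)]
        have : c + 1 - (r + 1) = c - r := by omega
        rw [this]
        have harr : c + (r + 1) = c + r + 1 := by omega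
        rw [harr, hdr, htk, List.reverse_append]
        simp only [List.reverse_singleton, List.singleton_append, lcpNat, heq, if_pos]
        omega
      · rw [if_neg heq, hdr, htk, List.reverse_append]
        simp only [List.reverse_singleton, List.singleton_append, lcpNat]
        rw [if_neg (fun h => heq h.symm)]
        omega
    · rw [dif_neg hcond]
      rcases Nat.lt_or_ge (c + r) l.length with hlt | hge
      · have hrc : ¬ r ≤ c := fun h => hcond ⟨h, hlt⟩
        have : c + 1 - r = 0 := by omega
        rw [this]
        simp [lcpNat_nil_right]
      · have : l.drop (c + r) = [] := by rw [List.drop_eq_nil_iff]; omega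
        rw [this, lcpNat_nil_left]
        omega

theorem expandEven_eq (l : List Char) (c : Nat) :
    ∀ d r, l.length - r ≤ d → r ≤ c → c + r ≤ l.length →
      expandEven l l.length c r = r + lcpNat (l.drop (c + r)) ((l.take (c - r)).reverse) := by
  intro d
  induction d with
  | zero =>
    intro r h0 h1 h2
    rw [expandEven, dif_neg (by omega)]
    have : l.drop (c + r) = [] := by rw [List.drop_eq_nil_iff]; omega
    rw [this, lcpNat_nil_left]
    omega
  | succ d ih =>
    intro r h0 h1 h2
    rw [expandEven]
    by_cases hcond : r + 1 ≤ c ∧ c + r < l.length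
    · rw [dif_pos hcond]
      obtain ⟨hrc, hcr⟩ := hcond
      have hcl : c - 1 - r < l.length := by omega
      have htk : l.take (c - r) = l.take (c - 1 - r) ++ [l[c - 1 - r]] := by
        have : c - r = (c - 1 - r) + 1 := by omega
        rw [this, take_succ_getElem l (c - 1 - r) hcl]
      have hdr : l.drop (c + r) = l[c + r] :: l.drop (c + r + 1) := List.drop_eq_getElem_cons hcr
      rw [getDC _ _ hcl, getDC _ _ hcr]
      by_cases heq : l[c - 1 - r] = l[c + r]
      · rw [if_pos heq, ih (r + 1) (by omega) (by omega) (by omega)]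
        have h1' : c - (r + 1) = c - 1 - r := by omega
        have h2' : c + (r + 1) = c + r + 1 := by omega
        rw [h1', h2', hdr, htk, List.reverse_append]
        simp only [List.reverse_singleton, List.singleton_append, lcpNat, heq, if_pos]
        omega
      · rw [if_neg heq, hdr, htk, List.reverse_append]
        simp only [List.reverse_singleton, List.singleton_append, lcpNat]
        rw [if_neg (fun h => heq h.symm)]
        omega
    · rw [dif_neg hcond]
      rcases Nat.lt_or_ge (c + r) l.length with hlt | hge
      · have : c - r = 0 := by omega
        rw [this]
        simp [lcpNat_nil_right]
      · have : l.drop (c + r) = [] := by rw [List.drop_eq_nil_iff]; omega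
        rw [this, lcpNat_nil_left]
        omega

theorem computeLcp_get (l : List Char) (k j : Nat) (hk : k < l.length) (hj : j < l.length) :
    ((computeLcp l).getD k []).getD j 0 = getWordsLcp (l.drop k) (l.reverse.drop j) := by
  have h1 : (computeLcp l).getD k [] =
      (List.range l.length).map fun j => getWordsLcp (l.drop k) (l.reverse.drop j) := by
    rw [computeLcp, List.getD_eq_getElem _ _ (by simpa using hk)]
    simp
  rw [h1, List.getD_eq_getElem _ _ (by simpa using hj)]
  simp

-- A's odd value at center k equals B's expansion radius
theorem oddVal (l : List Char) (k : Nat) (hk : k < l.length) :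
    ((computeLcp l).getD k []).getD (l.length - k - 1) 0 = ((expandOdd l l.length k 1 : Nat) : Int) := by
  rw [computeLcp_get l k _ hk (by omega), getWordsLcp_eq]
  have hrev : l.reverse.drop (l.length - k - 1) = (l.take (k + 1)).reverse := by
    rw [List.drop_reverse]
    congr 1
    congr 1
    omega
  rw [hrev]
  -- expandOdd at r = 0 takes one guaranteed step to r = 1
  have h0 : expandOdd l l.length k 0 = expandOdd l l.length k 1 := by
    rw [expandOdd, dif_pos ⟨Nat.zero_le _, by omega⟩]
    simp
  have := expandOdd_eq l k l.length 0 (by omega) (by omega) (by omega)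
  simp only [Nat.add_zero, Nat.sub_zero, Nat.zero_add] at this
  rw [← h0, this]

theorem evenVal (l : List Char) (k : Nat) (hk1 : 1 ≤ k) (hk : k < l.length) :
    ((computeLcp l).getD k []).getD (l.length - k) 0 = ((expandEven l l.length k 0 : Nat) : Int) := by
  rw [computeLcp_get l k _ hk (by omega), getWordsLcp_eq]
  have hrev : l.reverse.drop (l.length - k) = (l.take k).reverse := by
    rw [List.drop_reverse]
    congr 2
    omega
  rw [hrev]
  have := expandEven_eq l k l.length 0 (by omega) (by omega) (by omega)
  simp only [Nat.add_zero, Nat.sub_zero, Nat.zero_add] at this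
  rw [this]

theorem expandOdd_ge_one (l : List Char) (k : Nat) (hk : k < l.length) :
    1 ≤ expandOdd l l.length k 1 := by
  rw [expandOdd_eq l k l.length 1 (by omega) (by omega) (by omega)]
  omega

theorem expandOdd_le (l : List Char) (k : Nat) (hk : k < l.length) :
    expandOdd l l.length k 1 ≤ l.length - k := by
  rw [expandOdd_eq l k l.length 1 (by omega) (by omega) (by omega)]
  simp only [Nat.add_sub_cancel]
  have := lcpNat_le_left (l.drop (k + 1)) ((l.take k).reverse)
  simp at this
  omega

theorem expandEven_le (l : List Char) (k : Nat) (hk1 : 1 ≤ k) (hk : k < l.length) :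
    expandEven l l.length k 0 ≤ l.length - k := by
  rw [expandEven_eq l k l.length 0 (by omega) (by omega) (by omega)]
  simp only [Nat.add_zero, Nat.sub_zero]
  have := lcpNat_le_left (l.drop k) ((l.take k).reverse)
  simp at this
  omega

-- generic paired-fold invariant
theorem fold_rel {α β γ : Type} (f : α → γ → α) (g : β → γ → β) (R : α → β → Prop)
    (ks : List γ) (h : ∀ a b k, k ∈ ks → R a b → R (f a k) (g b k)) :
    ∀ a b, R a b → R (ks.foldl f a) (ks.foldl g b) := by
  induction ks with
  | nil => intro a b hab; simpa using hab
  | cons k ks ih =>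
    intro a b hab
    simp only [List.foldl_cons]
    exact ih (fun a b k hk => h a b k (List.mem_cons_of_mem _ hk)) _ _
      (h a b k List.mem_cons_self hab)

-- invariant for the first (odd-centers) loop
def R1 (n : Nat) (a b : List Int) : Prop :=
  a = b ∧ b.length = n ∧ ∀ j, j < n → b.getD j 0 = -1 ∨ 1 ≤ b.getD j 0

-- invariant for the second (even-centers) loop
def R2 (n : Nat) (a b : List Int) : Prop :=
  a.length = n ∧ b.length = n ∧ ∀ j, j < n →
    (a.getD j 0 = b.getD j 0 ∧ (b.getD j 0 = -1 ∨ 1 ≤ b.getD j 0)) ∨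
    (a.getD j 0 = 0 ∧ b.getD j 0 = -1)

theorem loop1_step (l : List Char) (a b : List Int) (k : Nat) (hk : k < l.length)
    (h : R1 l.length a b) :
    R1 l.length
      (setMaxA a ((k : Int) + ((computeLcp l).getD k []).getD (l.length - k - 1) 0 - 1)
        (2 * ((computeLcp l).getD k []).getD (l.length - k - 1) 0 - 1))
      (setIfGt b (k + expandOdd l l.length k 1 - 1) (2 * ((expandOdd l l.length k 1 : Nat) : Int) - 1)) := by
  obtain ⟨hab, hlen, hinv⟩ := h
  subst hab
  set r := expandOdd l l.length k 1 with hr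
  have hr1 : 1 ≤ r := expandOdd_ge_one l k hk
  have hrle : r ≤ l.length - k := expandOdd_le l k hk
  have hi : k + r - 1 < l.length := by omega
  rw [oddVal l k hk]
  have htn : ((k : Int) + ((r : Nat) : Int) - 1).toNat = k + r - 1 := by omega
  rw [setMaxA, htn]
  set i := k + r - 1 with hidef
  set v : Int := 2 * ((r : Nat) : Int) - 1 with hv
  have hv1 : 1 ≤ v := by rw [hv]; omega
  have hilen : i < a.length := by omega
  constructor
  · -- arrays stay equal
    rw [setIfGt]
    by_cases hgt : v > a.getD i 0
    · rw [if_pos hgt]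
      congr 1
      omega
    · rw [if_neg hgt]
      have : max (a.getD i 0) v = a.getD i 0 := by omega
      rw [this, set_getD_self _ _ hilen]
  · constructor
    · rw [setIfGt]; split <;> simp [hlen]
    · intro j hj
      rw [setIfGt]
      by_cases hgt : v > a.getD i 0
      · rw [if_pos hgt, getD_set' _ _ _ _ hilen]
        by_cases hij : i = j
        · rw [if_pos hij]; right; omega
        · rw [if_neg hij]; exact hinv j hj
      · rw [if_neg hgt]; exact hinv j hj

theorem loop2_step (l : List Char) (a b : List Int) (k : Nat) (hk1 : 1 ≤ k) (hk : k < l.length)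
    (h : R2 l.length a b) :
    R2 l.length
      (setMaxA a ((k : Int) + ((computeLcp l).getD k []).getD (l.length - k) 0 - 1)
        (2 * ((computeLcp l).getD k []).getD (l.length - k) 0))
      (if expandEven l l.length k 0 = 0 then b
       else setIfGt b (k + expandEven l l.length k 0 - 1) (2 * ((expandEven l l.length k 0 : Nat) : Int))) := by
  obtain ⟨halen, hblen, hinv⟩ := h
  rw [evenVal l k hk1 hk]
  set r := expandEven l l.length k 0 with hr
  have hrle : r ≤ l.length - k := expandEven_le l k hk1 hk
  by_cases hr0 : r = 0
  · -- A writes max(lmp[k-1], 0); B does nothing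
    rw [if_pos hr0, hr0]
    have htn : ((k : Int) + ((0 : Nat) : Int) - 1).toNat = k - 1 := by omega
    rw [setMaxA]
    simp only [Nat.cast_zero, mul_zero] at htn ⊢
    rw [htn]
    have hilen : k - 1 < a.length := by omega
    refine ⟨by simp [halen], hblen, ?_⟩
    intro j hj
    rw [getD_set' _ _ _ _ hilen]
    by_cases hij : k - 1 = j
    · rw [if_pos hij]
      subst hij
      rcases hinv (k - 1) hj with ⟨heq, hsh⟩ | ⟨ha0, hbm⟩
      · rcases hsh with hbm | hb1
        · right
          refine ⟨?_, hbm⟩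
          rw [heq, hbm]
          decide
        · left
          refine ⟨?_, Or.inr hb1⟩
          rw [heq]
          omega
      · right
        refine ⟨?_, hbm⟩
        rw [ha0]
        decide
    · rw [if_neg hij]; exact hinv j hj
  · -- both write; values agree
    rw [if_neg hr0]
    have hr1 : 1 ≤ r := by omega
    have hi : k + r - 1 < l.length := by omega
    have htn : ((k : Int) + ((r : Nat) : Int) - 1).toNat = k + r - 1 := by omega
    rw [setMaxA, htn, setIfGt]
    set i := k + r - 1 with hidef
    set v : Int := 2 * ((r : Nat) : Int) with hv
    have hv2 : 2 ≤ v := by rw [hv]; omega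
    have hialen : i < a.length := by omega
    have hiblen : i < b.length := by omega
    refine ⟨by simp [halen], ?_, ?_⟩
    · split <;> simp [hblen]
    intro j hj
    by_cases hij : i = j
    · subst hij
      rcases hinv i (by omega) with ⟨heq, hsh⟩ | ⟨ha0, hbm⟩
      · rw [getD_set' _ _ _ _ hialen, if_pos rfl]
        by_cases hgt : v > b.getD i 0
        · rw [if_pos hgt, getD_set' _ _ _ _ hiblen, if_pos rfl]
          left; rw [heq]
          constructor
          · omega
          · right; omega
        · rw [if_neg hgt]
          left
          constructor
          · rw [heq]; omega
          · rcases hsh with h' | h' 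
            · left; exact h'
            · right; exact h'
      · rw [getD_set' _ _ _ _ hialen, if_pos rfl]
        have hgt : v > b.getD i 0 := by omega
        rw [if_pos hgt, getD_set' _ _ _ _ hiblen, if_pos rfl]
        left
        constructor
        · omega
        · right; omega
    · rw [getD_set' _ _ _ _ hialen, if_neg hij]
      by_cases hgt : v > b.getD i 0
      · rw [if_pos hgt, getD_set' _ _ _ _ hiblen, if_neg hij]
        exact hinv j hj
      · rw [if_neg hgt]; exact hinv j hj

-- the whole pipeline, stated over the character list
theorem main_eq (l : List Char) :
    ((List.range' 1 (l.length - 1)).foldl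
        (fun (lmp : List Int) (k : Nat) => setMaxA lmp ((k : Int) + ((computeLcp l).getD k []).getD (l.length - k) 0 - 1)
          (2 * ((computeLcp l).getD k []).getD (l.length - k) 0))
        ((List.range l.length).foldl
          (fun (lmp : List Int) (k : Nat) => setMaxA lmp ((k : Int) + ((computeLcp l).getD k []).getD (l.length - k - 1) 0 - 1)
            (2 * ((computeLcp l).getD k []).getD (l.length - k - 1) 0 - 1))
          (List.replicate l.length (-1)))).map (fun x => if x = 0 then -1 else x)
    = (List.range' 1 (l.length - 1)).foldl
        (fun (lmp : List Int) (c : Nat) => if expandEven l l.length c 0 = 0 then lmp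
          else setIfGt lmp (c + expandEven l l.length c 0 - 1) (2 * ((expandEven l l.length c 0 : Nat) : Int)))
        ((List.range l.length).foldl
          (fun (lmp : List Int) (c : Nat) => setIfGt lmp (c + expandOdd l l.length c 1 - 1) (2 * ((expandOdd l l.length c 1 : Nat) : Int) - 1))
          (List.replicate l.length (-1))) := by
  have h1 : R1 l.length
      ((List.range l.length).foldl
        (fun (lmp : List Int) (k : Nat) => setMaxA lmp ((k : Int) + ((computeLcp l).getD k []).getD (l.length - k - 1) 0 - 1)
          (2 * ((computeLcp l).getD k []).getD (l.length - k - 1) 0 - 1))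
        (List.replicate l.length (-1)))
      ((List.range l.length).foldl
        (fun (lmp : List Int) (c : Nat) => setIfGt lmp (c + expandOdd l l.length c 1 - 1) (2 * ((expandOdd l l.length c 1 : Nat) : Int) - 1))
        (List.replicate l.length (-1))) := by
    apply fold_rel
    · intro a b k hkmem hR
      exact loop1_step l a b k (List.mem_range.mp hkmem) hR
    · refine ⟨rfl, by simp, ?_⟩
      intro j hj
      rw [List.getD_eq_getElem _ _ (by simpa using hj)]
      simp
  have h2 : R2 l.length
      ((List.range' 1 (l.length - 1)).foldl
        (fun (lmp : List Int) (k : Nat) => setMaxA lmp ((k : Int) + ((computeLcp l).getD k []).getD (l.length - k) 0 - 1)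
          (2 * ((computeLcp l).getD k []).getD (l.length - k) 0))
        ((List.range l.length).foldl
          (fun (lmp : List Int) (k : Nat) => setMaxA lmp ((k : Int) + ((computeLcp l).getD k []).getD (l.length - k - 1) 0 - 1)
            (2 * ((computeLcp l).getD k []).getD (l.length - k - 1) 0 - 1))
          (List.replicate l.length (-1))))
      ((List.range' 1 (l.length - 1)).foldl
        (fun (lmp : List Int) (c : Nat) => if expandEven l l.length c 0 = 0 then lmp
          else setIfGt lmp (c + expandEven l l.length c 0 - 1) (2 * ((expandEven l l.length c 0 : Nat) : Int)))
        ((List.range l.length).foldl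
          (fun (lmp : List Int) (c : Nat) => setIfGt lmp (c + expandOdd l l.length c 1 - 1) (2 * ((expandOdd l l.length c 1 : Nat) : Int) - 1))
          (List.replicate l.length (-1)))) := by
    apply fold_rel
    · intro a b k hkmem hR
      have hk' := List.mem_range'_1.mp hkmem
      exact loop2_step l a b k hk'.1 (by omega) hR
    · obtain ⟨heq1, hlen1, hsh1⟩ := h1
      rw [heq1]
      refine ⟨hlen1, hlen1, ?_⟩
      intro j hj
      left
      exact ⟨rfl, hsh1 j hj⟩
  obtain ⟨halen, hblen, hinv⟩ := h2
  apply List.ext_getElem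
  · rw [List.length_map, halen, hblen]
  · intro j hj1 hj2
    simp only [List.getElem_map]
    have hjn : j < l.length := by rw [← hblen]; exact hj2
    rcases hinv j hjn with ⟨heq, hsh⟩ | ⟨ha0, hbm⟩
    · rw [← getDI _ j (by omega), ← getDI _ j (by omega), heq]
      split
      · omega
      · rfl
    · rw [← getDI _ j (by omega), ← getDI _ j (by omega), ha0, hbm]
      rfl

-- ===== VERDICT (by name: the statement is the Claim_ definition above) =====
theorem computeLmp_spec : Claim_equal_computeLmp := by
  intro w _
  exact main_eq w.toList
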